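-- pv_equiv track=rewrite | github.com/Happzy-WHU/extact_json | main.py | getQaList
-- ===== SOURCE A (Python) =====
-- def getJsonType(d):
--     if "scores" in d or "lastScores" in d:
--         return "scores"
--     if "[user](#message)" in d.values():
--         return "user"
--     if "[assistant](#message)" in d.values():
--         return "assistant"
--
-- def getQaList(source_data):
--     result = []
--     tmp = []
--     lock = False
--     for item in source_data:
--         if getJsonType(item) == "user":
--             if not lock:
--                 tmp.append(item)
--                 lock = True
--             else:
--                 if len(tmp) > 1:
--                     result.append(tmp)
--                 tmp = [item]
--         else:
--             tmp.append(item)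
--     if tmp and len(tmp) > 1:
--         result.append(tmp)
--     return result
-- ===== SOURCE B (Python) =====
-- def getJsonType(d):
--     if "scores" in d or "lastScores" in d:
--         return "scores"
--     if "[user](#message)" in d.values():
--         return "user"
--     if "[assistant](#message)" in d.values():
--         return "assistant"
--
-- def getQaList(source_data):
--     # Build the groups back-to-front: scanning from the right, every "user"
--     # item closes the group it starts; the leftover prefix (items before the
--     # first user) is merged into the first group.  Keep groups longer than 1.
--     prefix = []
--     groups = []
--     for item in reversed(source_data):
--         if getJsonType(item) == "user":
--             groups.append([item] + prefix)
--             prefix = []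
--         else:
--             prefix = [item] + prefix
--     groups.reverse()
--     if groups:
--         groups[0] = prefix + groups[0]
--     else:
--         groups = [prefix]
--     return [g for g in groups if len(g) > 1]
-- ===== Notes on version B (the rewrite author's own statement) =====
-- stated objective: alternative
-- what changed: Replaces A's left-to-right accumulator with a lock flag and inline flushes by a single right-to-left pass in which every user item closes the group it starts, the leading prefix is merged into the first group afterwards, and the len>1 filter is applied once at the end.
import Mathlib
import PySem

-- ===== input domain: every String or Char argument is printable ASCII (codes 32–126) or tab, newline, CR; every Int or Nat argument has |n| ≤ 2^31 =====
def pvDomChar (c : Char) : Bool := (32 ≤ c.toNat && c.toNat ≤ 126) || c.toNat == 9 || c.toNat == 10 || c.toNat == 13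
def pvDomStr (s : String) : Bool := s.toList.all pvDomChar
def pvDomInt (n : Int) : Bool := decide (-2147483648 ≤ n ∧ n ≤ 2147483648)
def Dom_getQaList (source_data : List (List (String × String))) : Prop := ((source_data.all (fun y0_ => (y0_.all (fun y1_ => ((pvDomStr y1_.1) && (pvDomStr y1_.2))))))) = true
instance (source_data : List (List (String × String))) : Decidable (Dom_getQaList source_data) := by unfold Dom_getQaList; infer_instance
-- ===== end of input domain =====

-- B builds the groups back-to-front (one right-to-left pass, no lock flag) instead of
-- A's left-to-right accumulator with a lock; objective: alternative decomposition (same cost).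

-- ===== PORT A =====
-- shared module helper getJsonType (dict ported as PySem.Dict built from the assoc list)
def getJsonType (d : List (String × String)) : Option String :=
  let dd := PySem.Dict.ofList d
  if dd.contains "scores" || dd.contains "lastScores" then some "scores"
  else if dd.values.contains "[user](#message)" then some "user"
  else if dd.values.contains "[assistant](#message)" then some "assistant"
  else none

-- loop body of A: state (result, tmp, lock)
def pvStepA (st : List (List (List (String × String))) × List (List (String × String)) × Bool)
    (item : List (String × String)) :
    List (List (List (String × String))) × List (List (String × String)) × Bool :=
  let (result, tmp, lock) := st
  if getJsonType item = some "user" then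
    if !lock then (result, tmp ++ [item], true)
    else ((if tmp.length > 1 then result ++ [tmp] else result), [item], true)
  else (result, tmp ++ [item], lock)

def getQaList (source_data : List (List (String × String))) : List (List (List (String × String))) :=
  let st := source_data.foldl pvStepA ([], [], false)
  if !st.2.1.isEmpty && st.2.1.length > 1 then st.1 ++ [st.2.1] else st.1

-- ===== PORT B =====
-- loop body of B: state (prefix, groups), scanning the reversed list
def pvStepB (st : List (List (String × String)) × List (List (List (String × String))))
    (item : List (String × String)) :
    List (List (String × String)) × List (List (List (String × String))) :=
  if getJsonType item = some "user" then ([], st.2 ++ [item :: st.1])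
  else (item :: st.1, st.2)

def getQaList_alt (source_data : List (List (String × String))) : List (List (List (String × String))) :=
  let st := (source_data.reverse).foldl pvStepB ([], [])
  let groups := st.2.reverse
  let groups :=
    match groups with
    | g :: gs => (st.1 ++ g) :: gs
    | [] => [st.1]
  groups.filter (fun g => g.length > 1)

-- ===== PRECONDITION & SPEC =====
def Spec_getQaList (source_data : List (List (String × String))) (out : List (List (List (String × String)))) : Prop := out = getQaList_alt source_data
instance (source_data : List (List (String × String))) (out : List (List (List (String × String)))) : Decidable (Spec_getQaList source_data out) := by unfold Spec_getQaList; infer_instance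

-- ===== CLAIM (what is proved, stated in full; the proofs are below) =====
def Claim_equal_getQaList : Prop := ∀ (source_data : List (List (String × String))), Dom_getQaList source_data → Spec_getQaList source_data (getQaList source_data)

-- ===== LEMMAS AND PROOFS =====

-- the split of a list at its "user" items: (prefix before the first user, groups each starting with a user)
def pvSplit (l : List (List (String × String))) :
    List (List (String × String)) × List (List (List (String × String))) :=
  l.foldr (fun x st => if getJsonType x = some "user" then ([], (x :: st.1) :: st.2) else (x :: st.1, st.2)) ([], [])

def pvMergeHead (a : List (List (String × String))) :
    List (List (List (String × String))) → List (List (List (String × String)))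
  | [] => [a]
  | g :: gs => (a ++ g) :: gs

def pvP1 (g : List (List (String × String))) : Bool := g.length > 1

lemma pvSplit_cons (x : List (String × String)) (xs : List (List (String × String))) :
    pvSplit (x :: xs) = if getJsonType x = some "user" then ([], (x :: (pvSplit xs).1) :: (pvSplit xs).2)
      else (x :: (pvSplit xs).1, (pvSplit xs).2) := rfl

lemma pvB_foldr (l : List (List (String × String))) :
    l.foldr (fun x st => pvStepB st x) ([], []) = ((pvSplit l).1, (pvSplit l).2.reverse) := by
  induction l with
  | nil => rfl
  | cons x xs ih =>
    rw [List.foldr_cons, ih, pvSplit_cons]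
    by_cases h : getJsonType x = some "user" <;> simp [pvStepB, h]

lemma pvAlt_eq (l : List (List (String × String))) :
    getQaList_alt l = (pvMergeHead (pvSplit l).1 (pvSplit l).2).filter pvP1 := by
  unfold getQaList_alt
  rw [List.foldl_reverse, pvB_foldr]
  cases h : (pvSplit l).2 with
  | nil => rfl
  | cons g gs => simp only [List.reverse_reverse]; rfl

-- A's loop-plus-flush as a function of (rest of list, result, tmp, lock)
def pvRunA (l : List (List (String × String))) (res : List (List (List (String × String))))
    (tmp : List (List (String × String))) (lock : Bool) : List (List (List (String × String))) :=
  let st := l.foldl pvStepA (res, tmp, lock)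
  if !st.2.1.isEmpty && st.2.1.length > 1 then st.1 ++ [st.2.1] else st.1

lemma pvRunA_cons (x : List (String × String)) (xs : List (List (String × String)))
    (res : List (List (List (String × String)))) (tmp : List (List (String × String))) (lock : Bool) :
    pvRunA (x :: xs) res tmp lock
      = pvRunA xs (pvStepA (res, tmp, lock) x).1 (pvStepA (res, tmp, lock) x).2.1 (pvStepA (res, tmp, lock) x).2.2 := by
  simp [pvRunA, List.foldl_cons]

lemma pvRunA_nil (res : List (List (List (String × String)))) (tmp : List (List (String × String)))
    (lock : Bool) : pvRunA [] res tmp lock = res ++ (if pvP1 tmp then [tmp] else []) := by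
  simp only [pvRunA, List.foldl_nil]
  by_cases h : tmp.length > 1
  · have hne : tmp ≠ [] := by intro hh; simp [hh] at h
    simp [pvP1, h, hne]
  · simp [pvP1, h]

lemma pvRunA_true (l : List (List (String × String))) :
    ∀ res tmp, pvRunA l res tmp true = res ++ (((tmp ++ (pvSplit l).1) :: (pvSplit l).2).filter pvP1) := by
  induction l with
  | nil =>
    intro res tmp
    rw [pvRunA_nil]
    simp [pvSplit, List.filter_singleton]
  | cons x xs ih =>
    intro res tmp
    rw [pvRunA_cons]
    by_cases h : getJsonType x = some "user"
    · by_cases hl : tmp.length > 1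
      · have hs : pvStepA (res, tmp, true) x = (res ++ [tmp], [x], true) := by
          simp [pvStepA, h, hl]
        rw [hs]
        rw [ih]
        simp [pvSplit_cons, h, List.filter_cons, pvP1, hl]
      · have hs : pvStepA (res, tmp, true) x = (res, [x], true) := by
          simp [pvStepA, h, hl]
        rw [hs]
        rw [ih]
        simp [pvSplit_cons, h, List.filter_cons, pvP1, hl]
    · have hs : pvStepA (res, tmp, true) x = (res, tmp ++ [x], true) := by
        simp [pvStepA, h]
      rw [hs, ih]
      simp [pvSplit_cons, h]

lemma pvRunA_false (l : List (List (String × String))) :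
    ∀ res tmp, pvRunA l res tmp false
      = res ++ ((pvMergeHead (tmp ++ (pvSplit l).1) (pvSplit l).2).filter pvP1) := by
  induction l with
  | nil =>
    intro res tmp
    rw [pvRunA_nil]
    simp [pvSplit, pvMergeHead, List.filter_singleton]
  | cons x xs ih =>
    intro res tmp
    rw [pvRunA_cons]
    by_cases h : getJsonType x = some "user"
    · have hs : pvStepA (res, tmp, false) x = (res, tmp ++ [x], true) := by
        simp [pvStepA, h]
      rw [hs, pvRunA_true]
      simp [pvSplit_cons, h, pvMergeHead]
    · have hs : pvStepA (res, tmp, false) x = (res, tmp ++ [x], false) := by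
        simp [pvStepA, h]
      rw [hs, ih]
      have : (tmp ++ [x]) ++ (pvSplit xs).1 = tmp ++ (x :: (pvSplit xs).1) := by simp
      rw [this]
      simp [pvSplit_cons, h]

-- ===== VERDICT (by name: the statement is the Claim_ definition above) =====
theorem getQaList_spec : Claim_equal_getQaList := by
  unfold Claim_equal_getQaList
  intro l _
  unfold Spec_getQaList
  have hA : getQaList l = pvRunA l [] [] false := rfl
  rw [hA, pvRunA_false, pvAlt_eq]
  simp
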